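-- pv_equiv track=rewrite | github.com/wenijinew/viiv | utils.py | group_scopes
-- ===== SOURCE A (Python) =====
-- def group_scopes(scopes):
--     """Group scopes by the prefix.
--
--     Parameters:
--     ----------
--     scopes : dict[scope_name, foreground], e.g. {'scope 1': '#ff0000', 'scope 2': '#'}
--     """
--     scope_groups = {}
--     for scope in scopes.keys():
--         _splits = scope.split(".")
--         if len(_splits) == 1:
--             group_name = _splits[0]
--         else:
--             group_name = ".".join(_splits[0:2])
--
--         if group_name not in scope_groups:
--             scope_groups[group_name] = [scope]
--         else:
--             scope_groups[group_name].append(scope)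
--     return scope_groups
-- ===== SOURCE B (Python) =====
-- def group_scopes(scopes):
--     """Group scopes by the prefix (partition-refinement: no dict while grouping)."""
--     def key(scope):
--         parts = scope.split(".")
--         return parts[0] if len(parts) == 1 else ".".join(parts[:2])
--     out = []
--     names = [(key(s), s) for s in scopes]
--     while names:
--         g = names[0][0]
--         out.append((g, [s for k, s in names if k == g]))
--         names = [(k, s) for k, s in names if k != g]
--     return dict(out)
-- ===== Notes on version B (the rewrite author's own statement) =====
-- stated objective: alternative
-- what changed: Replaces A's single dict-building loop (membership test, insert-or-append) by partition refinement: a loop that repeatedly filters out the entire group of the first remaining scope, building the (group, members) pairs directly and only wrapping them in a dict at the end.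
import Mathlib
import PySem

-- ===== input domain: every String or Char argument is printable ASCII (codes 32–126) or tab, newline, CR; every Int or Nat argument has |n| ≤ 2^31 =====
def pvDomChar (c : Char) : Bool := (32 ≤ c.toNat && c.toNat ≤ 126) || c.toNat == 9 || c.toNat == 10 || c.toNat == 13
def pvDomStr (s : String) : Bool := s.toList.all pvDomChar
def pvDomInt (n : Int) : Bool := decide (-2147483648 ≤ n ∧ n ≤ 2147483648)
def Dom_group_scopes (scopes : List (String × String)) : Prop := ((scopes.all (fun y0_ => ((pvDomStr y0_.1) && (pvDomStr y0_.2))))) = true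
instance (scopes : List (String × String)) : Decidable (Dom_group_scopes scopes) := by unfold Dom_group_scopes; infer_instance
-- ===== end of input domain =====

-- B replaces A's dict-based insert-or-append loop by partition refinement: repeatedly
-- split off the whole group of the first remaining scope by filtering, no dict while
-- grouping (objective: alternative).


-- ===== PORT A =====
-- scope.split(".") has a non-empty literal separator, so split? never raises; the getD [] is unreachable
def group_scopes (scopes : List (String × String)) : List (String × List String) :=
  ((scopes.map Prod.fst).foldl
    (fun (d : PySem.Dict String (List String)) (scope : String) =>
      let _splits := (PySem.Str.split? scope ".").getD []
      let group_name :=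
        if _splits.length = 1 then PySem.List.pyGetD _splits 0 ""
        else PySem.Str.join "." (PySem.List.slice _splits (some 0) (some 2))
      if d.contains group_name = false then d.insert group_name [scope]
      else d.modify group_name [] (fun v => v ++ [scope]))
    PySem.Dict.empty).items

-- ===== PORT B =====
def pvKeyB (scope : String) : String :=
  let parts := (PySem.Str.split? scope ".").getD []
  if parts.length = 1 then PySem.List.pyGetD parts 0 ""
  else PySem.Str.join "." (PySem.List.slice parts none (some 2))

-- the while loop of Source B: peel off the first remaining scope's whole group by filtering
def pvGo (names : List (String × String)) : List (String × List String) :=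
  match names with
  | [] => []
  | p :: t =>
    (p.1, ((p :: t).filter (fun q => q.1 == p.1)).map Prod.snd) ::
      pvGo ((p :: t).filter (fun q => !(q.1 == p.1)))
termination_by names.length
decreasing_by
  have h : (p :: t).filter (fun q => !(q.1 == p.1)) = t.filter (fun q => !(q.1 == p.1)) := by
    simp
  rw [h]
  simpa using Nat.lt_succ_of_le (List.length_filter_le _ t)

def group_scopes_alt (scopes : List (String × String)) : List (String × List String) :=
  let names := scopes.map (fun p => (pvKeyB p.1, p.1))
  (PySem.Dict.ofList (pvGo names)).items

-- ===== PRECONDITION & SPEC =====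
def Spec_group_scopes (scopes : List (String × String)) (out : List (String × List String)) : Prop := out = group_scopes_alt scopes
instance (scopes : List (String × String)) (out : List (String × List String)) : Decidable (Spec_group_scopes scopes out) := by unfold Spec_group_scopes; infer_instance

-- ===== CLAIM (what is proved, stated in full; the proofs are below) =====
def Claim_equal_group_scopes : Prop := ∀ (scopes : List (String × String)), Dom_group_scopes scopes → Spec_group_scopes scopes (group_scopes scopes)

-- ===== LEMMAS AND PROOFS =====

-- A's loop body is one `modify` keyed by pvKeyB
theorem pv_step_eq (d : PySem.Dict String (List String)) (scope : String) :
    (let _splits := (PySem.Str.split? scope ".").getD []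
     let group_name :=
       if _splits.length = 1 then PySem.List.pyGetD _splits 0 ""
       else PySem.Str.join "." (PySem.List.slice _splits (some 0) (some 2))
     if d.contains group_name = false then d.insert group_name [scope]
     else d.modify group_name [] (fun v => v ++ [scope]))
    = d.modify (pvKeyB scope) [] (fun v => v ++ [scope]) := by
  have hkey : (let _splits := (PySem.Str.split? scope ".").getD []
      if _splits.length = 1 then PySem.List.pyGetD _splits 0 ""
      else PySem.Str.join "." (PySem.List.slice _splits (some 0) (some 2))) = pvKeyB scope := by
    simp [pvKeyB, PySem.List.slice_zero_start]
  simp only [hkey]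
  by_cases h : d.contains (pvKeyB scope) = true
  · simp [h]
  · simp only [Bool.not_eq_true] at h
    simp [h, PySem.Dict.modify, PySem.Dict.getD_of_not_contains d ([] : List String) h]

-- the grouping fold from any all-empty starting dict, characterised
theorem pv_fold_items (l : List String) (d : PySem.Dict String (List String))
    (hnd : d.keys.Nodup) (hget0 : ∀ g, d.getD g [] = []) :
    ((l.foldl (fun (d : PySem.Dict String (List String)) s =>
        d.modify (pvKeyB s) [] (fun v => v ++ [s])) d).items)
    = (PySem.Set.update d.keys (l.map pvKeyB)).map
        (fun g => (g, l.filter (fun s => pvKeyB s == g))) := by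
  set D := l.foldl (fun (d : PySem.Dict String (List String)) s =>
      d.modify (pvKeyB s) [] (fun v => v ++ [s])) d with hD
  have hnd' : D.keys.Nodup := by
    rw [hD]
    exact PySem.Dict.nodup_keys_foldl_modify_key l pvKeyB [] (fun _ s v => v ++ [s]) d hnd
  have hkeys : D.keys = PySem.Set.update d.keys (l.map pvKeyB) := by
    rw [hD, PySem.Dict.keys_foldl_modify_key l pvKeyB [] (fun _ s v => v ++ [s])]
  have hgetD : ∀ g, D.getD g [] = l.filter (fun s => pvKeyB s == g) := by
    intro g
    have hmap : l.foldl (fun (d : PySem.Dict String (List String)) s =>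
        d.modify (pvKeyB s) [] (fun v => v ++ [s])) d
        = (l.map (fun s => (pvKeyB s, s))).foldl
            (fun d p => d.modify p.1 [] (fun v => v ++ [p.2])) d := by
      rw [List.foldl_map]
    rw [hD, hmap, PySem.Dict.getD_foldl_modify_append, hget0]
    simp [List.filter_map, Function.comp_def]
  rw [PySem.Dict.items_eq_map_keys D hnd' [], hkeys]
  exact List.map_congr_left (fun g _ => by rw [hgetD])

-- A, characterised against the canonical grouping
theorem pv_A_eq (scopes : List (String × String)) :
    group_scopes scopes
    = (PySem.Set.ofList ((scopes.map Prod.fst).map pvKeyB)).map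
        (fun g => (g, (scopes.map Prod.fst).filter (fun s => pvKeyB s == g))) := by
  unfold group_scopes
  have hstep : (fun (d : PySem.Dict String (List String)) (scope : String) =>
      (let _splits := (PySem.Str.split? scope ".").getD []
       let group_name :=
         if _splits.length = 1 then PySem.List.pyGetD _splits 0 ""
         else PySem.Str.join "." (PySem.List.slice _splits (some 0) (some 2))
       if d.contains group_name = false then d.insert group_name [scope]
       else d.modify group_name [] (fun v => v ++ [scope])))
      = fun (d : PySem.Dict String (List String)) s =>
          d.modify (pvKeyB s) [] (fun v => v ++ [s]) :=
    funext fun d => funext fun s => pv_step_eq d s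
  rw [hstep, pv_fold_items (scopes.map Prod.fst) PySem.Dict.empty (by simp) (fun g => by simp)]
  simp [PySem.Dict.keys_empty, PySem.Set.update_nil_left]

-- set-of-first-occurrences commutes with filter
theorem pv_ofList_filter (q : String → Bool) (xs : List String) :
    PySem.Set.ofList (xs.filter q) = (PySem.Set.ofList xs).filter q := by
  induction xs with
  | nil => simp [PySem.Set.ofList_nil]
  | cons x xs ih =>
    by_cases hx : q x = true
    · have h1 : (x :: xs).filter q = x :: xs.filter q := by simp [hx]
      rw [h1, PySem.Set.ofList_cons, PySem.Set.ofList_cons, ih]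
      simp only [PySem.Set.discard, List.filter_cons, hx, if_pos]
      simp only [List.filter_filter]
      congr 1
      exact List.filter_congr (fun y _ => by rw [Bool.and_comm])
    · have hx' : q x = false := by simpa using hx
      have h1 : (x :: xs).filter q = xs.filter q := by simp [hx']
      rw [h1, PySem.Set.ofList_cons, ih]
      simp only [PySem.Set.discard, List.filter_cons, hx', if_neg, Bool.false_eq_true,
        not_false_iff, List.filter_filter]
      refine (List.filter_congr (fun y _ => ?_)).symm
      by_cases hyx : y = x
      · subst hyx; simp [hx']
      · simp [hyx]

-- pvGo, characterised against the canonical grouping (functional induction on the recursion)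
theorem pv_go_eq (names : List (String × String)) :
    pvGo names = (PySem.Set.ofList (names.map Prod.fst)).map
      (fun g => (g, (names.filter (fun q => q.1 == g)).map Prod.snd)) := by
  induction names using pvGo.induct with
  | case1 => simp [pvGo, PySem.Set.ofList_nil]
  | case2 p t ih =>
    rw [pvGo]
    have hrest : (p :: t).filter (fun q => !(q.1 == p.1)) = t.filter (fun q => !(q.1 == p.1)) := by
      simp
    rw [hrest] at ih ⊢
    rw [ih]
    have hkeys : (t.filter (fun q => !(q.1 == p.1))).map Prod.fst
        = (t.map Prod.fst).filter (fun y => !(y == p.1)) := by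
      rw [List.filter_map]; rfl
    rw [hkeys, pv_ofList_filter]
    simp only [List.map_cons, PySem.Set.ofList_cons, PySem.Set.discard, List.map_cons]
    congr 1
    refine List.map_congr_left (fun g hg => ?_)
    have hgne : ¬ (g = p.1) := by
      have := List.of_mem_filter hg
      simpa using this
    congr 1
    have h1 : (p :: t).filter (fun q => q.1 == g) = t.filter (fun q => q.1 == g) := by
      simp [List.filter_cons]
      intro h; exact absurd h.symm hgne
    rw [h1, List.filter_filter]
    refine congrArg _ (List.filter_congr (fun q _ => ?_)).symm
    by_cases hq : q.1 = g
    · simp [hq, hgne]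
    · simp [hq]

-- B, characterised against the same canonical grouping
theorem pv_B_eq (scopes : List (String × String)) :
    group_scopes_alt scopes
    = (PySem.Set.ofList ((scopes.map Prod.fst).map pvKeyB)).map
        (fun g => (g, (scopes.map Prod.fst).filter (fun s => pvKeyB s == g))) := by
  unfold group_scopes_alt
  set l := scopes.map Prod.fst with hl
  have hnames : scopes.map (fun p => (pvKeyB p.1, p.1)) = l.map (fun s => (pvKeyB s, s)) := by
    simp [hl, List.map_map, Function.comp_def]
  simp only [hnames]
  show (PySem.Dict.ofList (pvGo (l.map (fun s => (pvKeyB s, s))))).items = _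
  rw [pv_go_eq]
  have hfst : ((l.map (fun s => (pvKeyB s, s))).map Prod.fst) = l.map pvKeyB := by
    simp [List.map_map, Function.comp_def]
  have hgrp : ∀ g, (((l.map (fun s => (pvKeyB s, s))).filter (fun q => q.1 == g)).map Prod.snd)
      = l.filter (fun s => pvKeyB s == g) := by
    intro g
    rw [List.filter_map]
    simp [List.map_map, Function.comp_def]
  set P := (PySem.Set.ofList ((l.map (fun s => (pvKeyB s, s))).map Prod.fst)).map
      (fun g => (g, ((l.map (fun s => (pvKeyB s, s))).filter (fun q => q.1 == g)).map Prod.snd))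
    with hP
  have hPfst : P.map Prod.fst = PySem.Set.ofList (l.map pvKeyB) := by
    rw [hP, List.map_map]
    simp [Function.comp_def, hfst]
  have hnodup : (P.map Prod.fst).Nodup := by rw [hPfst]; exact PySem.Set.nodup_ofList _
  have hitems : (PySem.Dict.ofList P).items = P := by
    have h := PySem.Dict.items_foldl_insert_fresh P Prod.fst Prod.snd PySem.Dict.empty
      (fun a _ => by simp) hnodup
    simpa using h
  rw [hitems, hP, hfst]
  exact List.map_congr_left (fun g _ => by rw [hgrp])

-- ===== VERDICT (by name: the statement is the Claim_ definition above) =====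
theorem group_scopes_spec : Claim_equal_group_scopes := by
  intro scopes _
  unfold Spec_group_scopes
  rw [pv_A_eq, pv_B_eq]
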